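-- pv_equiv track=rewrite | github.com/joshanashakya/dissertation | workspace/dataset/java-python/GeeksForGeeks/3457/A/2.py | calculate_
-- ===== SOURCE A (Python) =====
-- def calculate_(s):
--
--     # if the size of binary is 1
--     # then the number of actions will be zero
--     if len(s) == 1:
--         return 0
--
--     # initializing the number of actions as 0 at first
--     count_ = 0
--     i = len(s) - 1
--     while i > 0:
--
--         # start traversing from the last digit
--         # if its 0 increment the count and decrement i
--         if s[i] == '0':
--             count_ += 1
--             i -= 1
--
--             # if s[i] == '1'
--         else:
--             count_ += 1
--
--             # stop until you get 0 in the binary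
--             while s[i] == '1' and i > 0:
--                 count_ += 1
--                 i -= 1
--             if i == 0:
--                 count_ += 1
--             # when encounter a 0 replace it with 1
--             s = s[:i] + "1" + s[i + 1:]
--     return count_
-- ===== SOURCE B (Python) =====
-- def calculate_(s):
--     # closed form: n-1+... instead of simulating the carry loop
--     n = len(s)
--     if n <= 1:
--         return 0
--     p = n - 1
--     while p >= 0 and s[p] == '0':
--         p -= 1
--     if p <= 0:
--         return n - 1
--     return n + 1 + sum(1 for c in s[1:p + 1] if c != '1')
-- ===== Notes on version B (the rewrite author's own statement) =====
-- stated objective: faster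
-- what changed: Replaces the carry-propagation simulation (which repeatedly rebuilds the string by slicing) with a closed form: one backward scan finds the rightmost non-zero position p, then the answer is len(s)+1 plus the count of non-one characters at positions 1..p (len(s)-1 when p<=0, and zero operations for strings of length at most one).
import Mathlib
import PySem

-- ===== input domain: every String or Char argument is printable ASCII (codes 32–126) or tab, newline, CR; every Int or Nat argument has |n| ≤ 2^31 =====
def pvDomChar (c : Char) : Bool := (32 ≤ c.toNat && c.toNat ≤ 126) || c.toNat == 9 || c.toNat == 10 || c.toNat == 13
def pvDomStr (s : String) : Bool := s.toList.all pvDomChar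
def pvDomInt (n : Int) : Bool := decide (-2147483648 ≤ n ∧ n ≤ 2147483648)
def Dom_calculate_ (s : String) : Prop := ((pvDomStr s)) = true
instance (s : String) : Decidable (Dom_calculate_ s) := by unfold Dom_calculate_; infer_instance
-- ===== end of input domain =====

-- B replaces A's carry-propagation simulation by a single backward scan plus a count (closed form); proved to return the same value on every string.


-- ===== PORT A =====
-- inner 'while s[i] == '1' and i > 0' loop; the index is always in range in A, so s[i] is pyGet? with an irrelevant default
def pvInnerA (l : List Char) (i c : Int) : Int × Int :=
  if h : ((PySem.List.pyGet? l i).getD ' ' = '1' ∧ 0 < i) then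
    pvInnerA l (i - 1) (c + 1)
  else (i, c)
termination_by i.toNat
decreasing_by omega

-- outer 'while i > 0' loop; 'fuel' only makes the recursion total (A never exhausts it: see pvOuterA_closed_form below)
def pvOuterA (fuel : Nat) (l : List Char) (i c : Int) : Int :=
  match fuel with
  | 0 => c
  | fuel + 1 =>
    if 0 < i then
      if (PySem.List.pyGet? l i).getD ' ' = '0' then
        pvOuterA fuel l (i - 1) (c + 1)
      else
        let r := pvInnerA l i (c + 1)
        let c2 := if r.1 = 0 then r.2 + 1 else r.2
        -- s = s[:i] + "1" + s[i+1:]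
        pvOuterA fuel (PySem.List.slice l (some 0) (some r.1) ++ '1' :: PySem.List.slice l (some (r.1 + 1)) none) r.1 c2
    else c

def calculate_ (s : String) : Int :=
  let l := s.toList
  if (l.length : Int) = 1 then 0
  else pvOuterA (2 * l.length + 2) l ((l.length : Int) - 1) 0

-- ===== PORT B =====
-- 'while p >= 0 and s[p] == '0': p -= 1'
def pvFindP (l : List Char) (p : Int) : Int :=
  if h : (0 ≤ p ∧ (PySem.List.pyGet? l p).getD ' ' = '0') then pvFindP l (p - 1) else p
termination_by (p + 1).toNat
decreasing_by omega

def calculate__alt (s : String) : Int :=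
  let l := s.toList
  let n : Int := l.length
  if n ≤ 1 then 0
  else
    let p := pvFindP l (n - 1)
    if p ≤ 0 then n - 1
    else n + 1 + ((PySem.List.slice l (some 1) (some (p + 1))).countP (fun c => decide (c ≠ '1')) : Int)

-- ===== PRECONDITION & SPEC =====
def Spec_calculate_ (s : String) (out : Int) : Prop := out = calculate__alt s
instance (s : String) (out : Int) : Decidable (Spec_calculate_ s out) := by unfold Spec_calculate_; infer_instance

-- ===== CLAIM (what is proved, stated in full; the proofs are below) =====
def Claim_equal_calculate_ : Prop := ∀ (s : String), Dom_calculate_ s → Spec_calculate_ s (calculate_ s)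

-- ===== LEMMAS AND PROOFS =====

-- where the inner while-loop stops, as a Nat recursion
def pvJ (l : List Char) : Nat → Nat
  | 0 => 0
  | i + 1 => if l.getD (i + 1) ' ' = '1' then pvJ l i else i + 1

-- rightmost non-'0' index in [1, i], if any
def pvQ (l : List Char) : Nat → Option Nat
  | 0 => none
  | i + 1 => if l.getD (i + 1) ' ' ≠ '0' then some (i + 1) else pvQ l i

-- number of non-'1' characters at positions 1..p
def pvCnt (l : List Char) (p : Nat) : Nat :=
  (List.range' 1 p).countP (fun k => decide (l.getD k ' ' ≠ '1'))

-- closed-form value of A's outer loop started at index i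
def pvF (l : List Char) (i : Nat) : Int :=
  match pvQ l i with
  | none => i
  | some p => (i : Int) + 2 + pvCnt l p

theorem pvJ_le (l : List Char) (i : Nat) : pvJ l i ≤ i := by
  induction i with
  | zero => simp [pvJ]
  | succ n ih => simp only [pvJ]; split <;> omega

theorem pvJ_ones (l : List Char) (i : Nat) : ∀ k, pvJ l i < k → k ≤ i → l.getD k ' ' = '1' := by
  induction i with
  | zero => omega
  | succ n ih =>
    intro k hk1 hk2
    by_cases h : l.getD (n + 1) ' ' = '1'
    · simp only [pvJ, if_pos h] at hk1
      rcases Nat.lt_or_ge k (n + 1) with h' | h'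
      · exact ih k hk1 (by omega)
      · have : k = n + 1 := by omega
        simpa [this] using h
    · simp only [pvJ, if_neg h] at hk1; omega

theorem pvJ_stop (l : List Char) (i : Nat) (h : pvJ l i ≠ 0) : l.getD (pvJ l i) ' ' ≠ '1' := by
  induction i with
  | zero => simp [pvJ] at h
  | succ n ih =>
    by_cases h1 : l.getD (n + 1) ' ' = '1'
    · simp only [pvJ, if_pos h1] at h ⊢; exact ih h
    · simp only [pvJ, if_neg h1]; exact h1

theorem pyGetD_nat (l : List Char) (i : Nat) :
    (PySem.List.pyGet? l (i : Int)).getD ' ' = l.getD i ' ' := by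
  simp [PySem.List.pyGet?_natCast, List.getD_eq_getElem?_getD]

theorem pvInnerA_nat (l : List Char) (i : Nat) (c : Int) :
    pvInnerA l (i : Int) c = ((pvJ l i : Int), c + ((i : Int) - pvJ l i)) := by
  induction i generalizing c with
  | zero => rw [pvInnerA]; simp [pvJ]
  | succ n ih =>
    rw [pvInnerA]
    by_cases h : l.getD (n + 1) ' ' = '1'
    · rw [dif_pos ⟨by rw [pyGetD_nat]; exact h, by exact_mod_cast Nat.succ_pos n⟩]
      have e : ((n + 1 : Nat) : Int) - 1 = (n : Int) := by push_cast; ring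
      rw [e, ih]
      simp only [pvJ, if_pos h]
      refine Prod.ext rfl ?_
      push_cast; ring
    · rw [dif_neg (by rw [pyGetD_nat]; exact fun hc => h hc.1)]
      simp only [pvJ, if_neg h]
      refine Prod.ext rfl ?_
      push_cast; ring

theorem pvCnt_succ (l : List Char) (p : Nat) :
    pvCnt l (p + 1) = pvCnt l p + (if l.getD (p + 1) ' ' ≠ '1' then 1 else 0) := by
  unfold pvCnt
  rw [List.range'_concat, List.countP_append]
  have e : 1 + 1 * p = p + 1 := by ring
  rw [e]
  by_cases h : l.getD (p + 1) ' ' = '1' <;> simp [h]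

theorem pvCnt_ones (l : List Char) (i j : Nat) (hj : j ≤ i)
    (h : ∀ k, j < k → k ≤ i → l.getD k ' ' = '1') : pvCnt l i = pvCnt l j := by
  induction i with
  | zero => have : j = 0 := by omega
            simp [this]
  | succ n ih =>
    rcases Nat.eq_or_lt_of_le hj with rfl | hlt
    · rfl
    · rw [pvCnt_succ, if_neg (not_not_intro (h (n + 1) (by omega) (by omega))),
        ih (by omega) (fun k h1 h2 => h k h1 (by omega))]
      simp

theorem pvCnt_set (l : List Char) (j : Nat) :
    pvCnt (l.set j '1') (j - 1) = pvCnt l (j - 1) := by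
  unfold pvCnt
  refine List.countP_congr (fun k hk => ?_)
  rw [List.mem_range'_1] at hk
  have hne : j ≠ k := by omega
  rw [List.getD_eq_getElem?_getD, List.getD_eq_getElem?_getD, List.getElem?_set_ne hne]

theorem splice_eq_set (l : List Char) (j : Nat) (hj : j < l.length) :
    PySem.List.slice l (some 0) (some (j : Int)) ++ '1' :: PySem.List.slice l (some ((j : Int) + 1)) none
      = l.set j '1' := by
  have e1 : ((j : Int) + 1) = ((j + 1 : Nat) : Int) := by push_cast; ring
  rw [e1, PySem.List.slice_from_natCast, PySem.List.slice_zero_start,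
    PySem.List.slice_to_natCast, List.set_eq_take_cons_drop _ hj]

theorem pvQ_some (l : List Char) (i p : Nat) (h : pvQ l i = some p) :
    1 ≤ p ∧ p ≤ i ∧ l.getD p ' ' ≠ '0' ∧ (∀ k, p < k → k ≤ i → l.getD k ' ' = '0') := by
  induction i with
  | zero => simp [pvQ] at h
  | succ n ih =>
    by_cases h1 : l.getD (n + 1) ' ' ≠ '0'
    · rw [pvQ, if_pos h1] at h
      obtain rfl : p = n + 1 := (Option.some.inj h).symm
      exact ⟨by omega, by omega, h1, fun k hk1 hk2 => by omega⟩
    · rw [pvQ, if_neg h1] at h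
      obtain ⟨a1, a2, a3, a4⟩ := ih h
      refine ⟨a1, by omega, a3, fun k hk1 hk2 => ?_⟩
      rcases Nat.lt_or_ge k (n + 1) with h' | h'
      · exact a4 k hk1 (by omega)
      · have : k = n + 1 := by omega
        simp_all

theorem pvOuterA_zero (f : Nat) (l : List Char) (c : Int) : pvOuterA f l 0 c = c := by
  cases f <;> simp [pvOuterA]

theorem pvF_zero_step (l : List Char) (m : Nat) (h0 : l.getD (m + 1) ' ' = '0') :
    pvF l (m + 1) = 1 + pvF l m := by
  unfold pvF
  rw [pvQ, if_neg (not_not_intro h0)]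
  cases hq : pvQ l m <;> · simp only [hq]; push_cast; ring

theorem set_getD_self (l : List Char) (j : Nat) (hj : j < l.length) :
    (l.set j '1').getD j ' ' = '1' := by
  rw [List.getD_eq_getElem?_getD, List.getElem?_set_eq_of_lt _ hj]; rfl

-- main loop invariant: the outer loop computes the closed form
theorem pvOuterA_closed_form (fuel : Nat) : ∀ (i : Nat) (l : List Char) (c : Int),
    i < l.length →
    fuel ≥ 2 * i + (if l.getD i ' ' = '1' then 1 else 2) →
    pvOuterA fuel l (i : Int) c = c + pvF l i := by
  induction fuel with
  | zero => intro i l c _ hf; split at hf <;> omega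
  | succ fuel ih =>
    intro i l c hlen hf
    match i with
    | 0 => rw [Nat.cast_zero, pvOuterA_zero]; simp [pvF, pvQ]
    | m + 1 =>
      have hpos : (0 : Int) < ((m + 1 : Nat) : Int) := by exact_mod_cast Nat.succ_pos m
      simp only [pvOuterA, if_pos hpos, pyGetD_nat]
      by_cases h0 : l.getD (m + 1) ' ' = '0'
      · rw [if_pos h0]
        have e : ((m + 1 : Nat) : Int) - 1 = ((m : Nat) : Int) := by push_cast; ring
        have hf' : fuel ≥ 2 * m + 2 := by
          rw [if_neg (by rw [h0]; decide)] at hf; omega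
        rw [e, ih m l (c + 1) (by omega) (by split <;> omega), pvF_zero_step l m h0]
        ring
      · rw [if_neg h0]
        have hin := pvInnerA_nat l (m + 1) (c + 1)
        by_cases hJ0 : pvJ l (m + 1) = 0
        · simp only [hin, hJ0, Nat.cast_zero, if_pos rfl, pvOuterA_zero]
          have hq : pvQ l (m + 1) = some (m + 1) := by rw [pvQ, if_pos h0]
          have hcnt : pvCnt l (m + 1) = 0 := by
            rw [pvCnt_ones l (m + 1) 0 (by omega)
              (fun k hk1 hk2 => pvJ_ones l (m + 1) k (hJ0 ▸ hk1) hk2)]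
            simp [pvCnt]
          simp only [pvF, hq, hcnt]
          push_cast; ring
        · obtain ⟨jm, hjm⟩ := Nat.exists_eq_succ_of_ne_zero hJ0
          have hjm' : pvJ l (m + 1) = jm + 1 := hjm
          have hJle : pvJ l (m + 1) ≤ m + 1 := pvJ_le l (m + 1)
          have hJlt : pvJ l (m + 1) < l.length := by omega
          have hset : (l.set (jm + 1) '1').getD (jm + 1) ' ' = '1' := by
            rw [← hjm']; exact set_getD_self l _ hJlt
          have hJstop : l.getD (pvJ l (m + 1)) ' ' ≠ '1' := pvJ_stop l (m + 1) hJ0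
          have hJne : ((pvJ l (m + 1) : Nat) : Int) ≠ 0 := by exact_mod_cast hJ0
          simp only [hin, if_neg hJne, splice_eq_set l (pvJ l (m + 1)) hJlt]
          have hfb : fuel ≥ 2 * pvJ l (m + 1) + 1 := by
            rcases Nat.lt_or_ge (pvJ l (m + 1)) (m + 1) with hc | hc
            · split at hf <;> omega
            · have hJeq : pvJ l (m + 1) = m + 1 := by omega
              rw [if_neg (hJeq ▸ hJstop)] at hf; omega
          rw [ih (pvJ l (m + 1)) (l.set (pvJ l (m + 1)) '1') _
            (by rw [List.length_set]; exact hJlt)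
            (by rw [if_pos (set_getD_self l _ hJlt)]; omega)]
          have hqs : pvQ (l.set (jm + 1) '1') (jm + 1) = some (jm + 1) := by
            rw [pvQ, if_pos (by rw [hset]; decide)]
          have hcs : pvCnt (l.set (jm + 1) '1') (jm + 1) = pvCnt l jm := by
            rw [pvCnt_succ, if_neg (not_not_intro hset)]
            simpa using pvCnt_set l (jm + 1)
          have hq : pvQ l (m + 1) = some (m + 1) := by rw [pvQ, if_pos h0]
          have hcnt : pvCnt l (m + 1) = pvCnt l jm + 1 := by
            rw [pvCnt_ones l (m + 1) (pvJ l (m + 1)) hJle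
              (fun k hk1 hk2 => pvJ_ones l (m + 1) k hk1 hk2), hjm,
              pvCnt_succ, if_pos (by rw [← hjm']; exact hJstop)]
          simp only [pvF, hjm', hqs, hq, hcs, hcnt]
          push_cast; ring

theorem pvFindP_spec (l : List Char) (i : Nat) :
    (pvQ l i = none → pvFindP l (i : Int) ≤ 0) ∧
    (∀ p, pvQ l i = some p → pvFindP l (i : Int) = (p : Int)) := by
  induction i with
  | zero =>
    refine ⟨fun _ => ?_, fun p hp => by simp [pvQ] at hp⟩
    rw [pvFindP]
    split
    · rw [pvFindP, dif_neg (by omega)]; omega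
    · omega
  | succ n ih =>
    by_cases h : l.getD (n + 1) ' ' = '0'
    · have hstep : pvFindP l ((n + 1 : Nat) : Int) = pvFindP l ((n : Nat) : Int) := by
        rw [pvFindP, dif_pos ⟨by positivity, by rw [pyGetD_nat]; exact h⟩]
        norm_num
      refine ⟨fun hq => ?_, fun p hp => ?_⟩
      · rw [hstep]
        rw [pvQ, if_neg (not_not_intro h)] at hq
        exact ih.1 hq
      · rw [hstep]
        rw [pvQ, if_neg (not_not_intro h)] at hp
        exact ih.2 p hp
    · have hstop : pvFindP l ((n + 1 : Nat) : Int) = ((n + 1 : Nat) : Int) := by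
        rw [pvFindP, dif_neg (by rw [pyGetD_nat]; exact fun hc => h hc.2)]
      refine ⟨fun hq => ?_, fun p hp => ?_⟩
      · rw [pvQ, if_pos h] at hq; simp at hq
      · rw [pvQ, if_pos h] at hp
        rw [hstop, ← Option.some.inj hp]

theorem take_drop_count (l : List Char) (p : Nat) (hp : p < l.length) :
    ((l.drop 1).take p).countP (fun c => decide (c ≠ '1')) = pvCnt l p := by
  induction p with
  | zero => simp [pvCnt]
  | succ n ih =>
    have h1 : (l.drop 1)[n]? = some (l.getD (n + 1) ' ') := by
      rw [List.getElem?_drop, List.getD_eq_getElem?_getD, Nat.add_comm 1 n]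
      rw [List.getElem?_eq_getElem (by omega)]
      rfl
    rw [List.take_add_one, h1, List.countP_append, ih (by omega), pvCnt_succ]
    by_cases h : l.getD (n + 1) ' ' = '1' <;> simp [h]

theorem slice_count (l : List Char) (p : Nat) (hp : p < l.length) :
    ((PySem.List.slice l (some 1) (some ((p : Int) + 1))).countP (fun c => decide (c ≠ '1')) : Int)
      = (pvCnt l p : Int) := by
  have e : ((p : Int) + 1) = ((p + 1 : Nat) : Int) := by push_cast; ring
  have e1 : (1 : Int) = ((1 : Nat) : Int) := rfl
  rw [e, e1, PySem.List.slice_natCast, Nat.add_sub_cancel, take_drop_count l p hp]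

-- ===== VERDICT (by name: the statement is the Claim_ definition above) =====
theorem calculate__spec : Claim_equal_calculate_ := by
  intro s _
  unfold Spec_calculate_ calculate_ calculate__alt
  simp only []
  set l := s.toList with hl
  match hn : l.length with
  | 0 =>
    have hnil : l = [] := List.length_eq_zero_iff.mp hn
    rw [hnil]
    norm_num
    rw [pvOuterA]
    norm_num
  | 1 => norm_num
  | m + 2 =>
    have hne1 : ((m + 2 : Nat) : Int) ≠ 1 := by push_cast; omega
    have hle1 : ¬ ((m + 2 : Nat) : Int) ≤ 1 := by push_cast; omega
    rw [if_neg hne1, if_neg hle1]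
    have ei : ((m + 2 : Nat) : Int) - 1 = ((m + 1 : Nat) : Int) := by push_cast; ring
    rw [ei]
    have hlen : m + 1 < l.length := by omega
    have hval := pvOuterA_closed_form (2 * (m + 2) + 2) (m + 1) l 0 hlen
      (by split <;> omega)
    rw [hval]
    have hfp := pvFindP_spec l (m + 1)
    cases hq : pvQ l (m + 1) with
    | none =>
      rw [if_pos (hfp.1 hq)]
      simp only [pvF, hq]
      push_cast; ring
    | some p =>
      obtain ⟨hp1, hp2, _, _⟩ := pvQ_some l (m + 1) p hq
      rw [hfp.2 p hq, if_neg (by exact_mod_cast by omega : ¬ ((p : Nat) : Int) ≤ 0),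
        slice_count l p (by omega)]
      simp only [pvF, hq]
      push_cast; ring
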